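-- pv_equiv track=rewrite | github.com/EggheadJohnson/AdventOfCode2023 | day05/solutions.py | segmentInputIntoBlocks
-- ===== SOURCE A (Python) =====
-- def segmentInputIntoBlocks(input):
--     allBlocks = []
--     block = []
--     for line in input:
--         if len(line) == 0:
--             allBlocks.append(block)
--             block = []
--         else:
--             block.append(line)
--     allBlocks.append(block)
--     return allBlocks
-- ===== SOURCE B (Python) =====
-- def segmentInputIntoBlocks(input):
--     lines = list(input)
--     seps = [i for i, line in enumerate(lines) if len(line) == 0]
--     blocks = []
--     start = 0
--     for i in seps:
--         blocks.append(lines[start:i])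
--         start = i + 1
--     blocks.append(lines[start:])
--     return blocks
-- ===== Notes on version B (the rewrite author's own statement) =====
-- stated objective: alternative
-- what changed: Replaces the single accumulate-and-flush pass with an index-then-slice decomposition: first collect the positions of empty lines, then cut the list into slices between consecutive separators with a moving cursor.
import Mathlib
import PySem

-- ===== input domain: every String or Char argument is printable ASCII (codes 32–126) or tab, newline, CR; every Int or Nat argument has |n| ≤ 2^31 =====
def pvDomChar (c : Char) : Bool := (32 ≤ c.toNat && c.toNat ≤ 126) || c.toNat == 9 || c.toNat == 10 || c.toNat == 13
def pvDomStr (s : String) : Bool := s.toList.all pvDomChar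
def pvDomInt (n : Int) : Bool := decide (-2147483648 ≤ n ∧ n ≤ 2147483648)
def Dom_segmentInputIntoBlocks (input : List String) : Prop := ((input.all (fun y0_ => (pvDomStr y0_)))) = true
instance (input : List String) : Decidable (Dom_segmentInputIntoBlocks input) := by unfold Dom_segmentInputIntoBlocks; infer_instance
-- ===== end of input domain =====

-- B replaces A's single accumulate-and-flush pass by an index-then-slice decomposition
-- (collect empty-line positions, then cut slices between consecutive separators); same cost, alternative structure.


-- ===== PORT A =====
def segmentInputIntoBlocks (input : List String) : List (List String) :=
  let r := input.foldl
    (fun (acc : List (List String) × List String) line =>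
      if PySem.Str.len line == 0 then (acc.1 ++ [acc.2], [])
      else (acc.1, acc.2 ++ [line]))
    ([], [])
  r.1 ++ [r.2]

-- ===== PORT B =====
def segmentInputIntoBlocks_alt (input : List String) : List (List String) :=
  let lines := input
  let seps := ((PySem.List.enumerate lines 0).filter (fun p => PySem.Str.len p.2 == 0)).map Prod.fst
  let r := seps.foldl
    (fun (acc : List (List String) × Int) i =>
      (acc.1 ++ [PySem.List.slice lines (some acc.2) (some i)], i + 1))
    ([], 0)
  r.1 ++ [PySem.List.slice lines (some r.2) none]

-- ===== PRECONDITION & SPEC =====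
def Spec_segmentInputIntoBlocks (input : List String) (out : List (List String)) : Prop := out = segmentInputIntoBlocks_alt input
instance (input : List String) (out : List (List String)) : Decidable (Spec_segmentInputIntoBlocks input out) := by unfold Spec_segmentInputIntoBlocks; infer_instance

-- ===== CLAIM (what is proved, stated in full; the proofs are below) =====
def Claim_equal_segmentInputIntoBlocks : Prop := ∀ (input : List String), Dom_segmentInputIntoBlocks input → Spec_segmentInputIntoBlocks input (segmentInputIntoBlocks input)

-- ===== LEMMAS AND PROOFS =====

/-- Bridge: the intended split of a list of lines into blocks separated by empty lines. -/
def splitP : List String → List (List String)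
  | [] => [[]]
  | l :: ls =>
    if PySem.Str.len l == 0 then [] :: splitP ls
    else (l :: (splitP ls).headD []) :: (splitP ls).tail

lemma str_len_zero_iff (l : String) : (PySem.Str.len l == 0) = true ↔ l = "" := by
  simp [PySem.Str.len_eq]

lemma splitP_ne_nil (ls : List String) : splitP ls ≠ [] := by
  cases ls with
  | nil => simp [splitP]
  | cons l ls => by_cases h : l = "" <;> simp [splitP, h]

lemma A_inv (ls : List String) : ∀ (ab : List (List String)) (b : List String),
    (ls.foldl
      (fun (acc : List (List String) × List String) line =>
        if PySem.Str.len line == 0 then (acc.1 ++ [acc.2], [])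
        else (acc.1, acc.2 ++ [line]))
      (ab, b)).1
    ++ [(ls.foldl
      (fun (acc : List (List String) × List String) line =>
        if PySem.Str.len line == 0 then (acc.1 ++ [acc.2], [])
        else (acc.1, acc.2 ++ [line]))
      (ab, b)).2]
    = ab ++ ((b ++ (splitP ls).headD []) :: (splitP ls).tail) := by
  induction ls with
  | nil => intro ab b; simp [splitP]
  | cons l ls ih =>
    intro ab b
    by_cases h : PySem.Str.len l == 0
    · have hs : l = "" := (str_len_zero_iff l).1 h
      simp only [List.foldl_cons, h, if_pos, ih]
      have hne := splitP_ne_nil ls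
      cases hsp : splitP ls with
      | nil => exact absurd hsp hne
      | cons c cs => simp [splitP, hs, hsp]
    · have hs : ¬ l = "" := fun e => h ((str_len_zero_iff l).2 e)
      simp only [List.foldl_cons, h, if_neg, ih, Bool.false_eq_true, not_false_iff]
      have hne := splitP_ne_nil ls
      cases hsp : splitP ls with
      | nil => exact absurd hsp hne
      | cons c cs => simp [splitP, hs, hsp]

lemma A_eq_splitP (input : List String) : segmentInputIntoBlocks input = splitP input := by
  have h := A_inv input [] []
  have hne := splitP_ne_nil input
  cases hsp : splitP input with
  | nil => exact absurd hsp hne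
  | cons c cs =>
    rw [hsp] at h
    simpa [segmentInputIntoBlocks, hsp] using h

/-- B's step function over the fixed list `lst`. -/
def bStep (lst : List String) (acc : List (List String) × Int) (i : Int) :
    List (List String) × Int :=
  (acc.1 ++ [PySem.List.slice lst (some acc.2) (some i)], i + 1)

/-- B's separator indices for the enumerated suffix. -/
def sepsE (ls : List String) (s : Int) : List Int :=
  ((PySem.List.enumerate ls s).filter (fun p => PySem.Str.len p.2 == 0)).map Prod.fst

lemma sepsE_nil (s : Int) : sepsE [] s = [] := by
  simp [sepsE, PySem.List.enumerate_nil]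

lemma sepsE_cons (l : String) (ls : List String) (s : Int) :
    sepsE (l :: ls) s =
      (if PySem.Str.len l == 0 then [s] else []) ++ sepsE ls (s + 1) := by
  by_cases hs : l = ""
  · simp [sepsE, PySem.List.enumerate_cons, hs]
  · have hlen : ¬ ((PySem.Str.len l == 0) = true) := fun e => hs ((str_len_zero_iff l).1 e)
    simp only [PySem.Str.len_eq, beq_iff_eq, Int.natCast_eq_zero] at hlen
    simp [sepsE, PySem.List.enumerate_cons, hs]

lemma B_gen (lst : List String) : ∀ (n k j : Nat) (acc : List (List String)),
    lst.length - k = n → j ≤ k → k ≤ lst.length →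
    (∀ m (hm : m < lst.length), j ≤ m → m < k → ¬ (PySem.Str.len lst[m] == 0)) →
    ((sepsE (lst.drop k) (k : Int)).foldl (bStep lst) (acc, (j : Int))).1
      ++ [PySem.List.slice lst
            (some ((sepsE (lst.drop k) (k : Int)).foldl (bStep lst) (acc, (j : Int))).2) none]
    = acc ++ (((lst.drop j).take (k - j) ++ (splitP (lst.drop k)).headD [])
              :: (splitP (lst.drop k)).tail) := by
  intro n
  induction n with
  | zero =>
    intro k j acc hn hjk hk hno
    have hk' : k = lst.length := by omega
    subst hk'
    simp only [List.drop_length, sepsE_nil, List.foldl_nil, splitP]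
    rw [PySem.List.slice_from_natCast]
    have : (lst.drop j).take (lst.length - j) = lst.drop j := by
      apply List.take_of_length_le; simp
    simp [this]
  | succ n ih =>
    intro k j acc hn hjk hk hno
    have hklt : k < lst.length := by omega
    have hdrop : lst.drop k = lst[k] :: lst.drop (k + 1) :=
      List.drop_eq_getElem_cons hklt
    rw [hdrop, sepsE_cons]
    rw [show ((k : Int) + 1) = ((k + 1 : Nat) : Int) by push_cast; ring]
    by_cases h : PySem.Str.len lst[k] == 0
    · -- separator at k: emit slice [j,k), restart at k+1
      have hs : lst[k] = "" := (str_len_zero_iff _).1 h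
      simp only [h, if_pos, List.singleton_append, List.foldl_cons]
      have hstep : bStep lst (acc, (j : Int)) (k : Int)
          = (acc ++ [(lst.drop j).take (k - j)], ((k + 1 : Nat) : Int)) := by
        simp [bStep, PySem.List.slice_natCast]
      rw [hstep]
      have := ih (k + 1) (k + 1) (acc ++ [(lst.drop j).take (k - j)])
        (by omega) (le_refl _) (by omega) (fun m hm h1 h2 => by omega)
      rw [this]
      have hne := splitP_ne_nil (lst.drop (k + 1))
      cases hsp : splitP (lst.drop (k + 1)) with
      | nil => exact absurd hsp hne
      | cons c cs => simp [splitP, hs, hsp]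
    · -- no separator at k: extend the pending block
      have hs : ¬ lst[k] = "" := fun e => h ((str_len_zero_iff _).2 e)
      simp only [h, if_neg, List.nil_append, Bool.false_eq_true, not_false_iff]
      have := ih (k + 1) j acc (by omega) (by omega) (by omega)
        (fun m hm h1 h2 => by
          rcases Nat.lt_or_ge m k with hmk | hmk
          · exact hno m hm h1 hmk
          · have : m = k := by omega
            subst this; exact h)
      rw [this]
      have hne := splitP_ne_nil (lst.drop (k + 1))
      cases hsp : splitP (lst.drop (k + 1)) with
      | nil => exact absurd hsp hne
      | cons c cs =>
        have htake : (lst.drop j).take (k + 1 - j) = (lst.drop j).take (k - j) ++ [lst[k]] := by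
          have hlen : k - j < (lst.drop j).length := by simp; omega
          have hget : (lst.drop j)[k - j] = lst[k] := by
            rw [List.getElem_drop]
            congr 1; omega
          rw [show k + 1 - j = (k - j) + 1 by omega]
          rw [← hget, List.take_add_one, List.getElem?_eq_getElem hlen]
          simp
        simp [splitP, hs, hsp, htake]

lemma B_eq_splitP (input : List String) : segmentInputIntoBlocks_alt input = splitP input := by
  have h := B_gen input (input.length) 0 0 [] (by omega) (le_refl _) (Nat.zero_le _)
    (fun m hm h1 h2 => by omega)
  simp only [List.drop_zero, Nat.sub_zero, List.take_zero, List.nil_append,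
    Nat.cast_zero, List.nil_append] at h
  have hne := splitP_ne_nil input
  cases hsp : splitP input with
  | nil => exact absurd hsp hne
  | cons c cs =>
    rw [hsp] at h
    simp only [List.headD_cons, List.tail_cons] at h
    simpa [segmentInputIntoBlocks_alt, sepsE, bStep, hsp] using h

-- ===== VERDICT (by name: the statement is the Claim_ definition above) =====
theorem segmentInputIntoBlocks_spec : Claim_equal_segmentInputIntoBlocks := by
  intro input _
  unfold Spec_segmentInputIntoBlocks
  rw [A_eq_splitP, B_eq_splitP]
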